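-- pv_equiv track=rewrite | github.com/ralph-groupscholar/groupscholar-intake-normalizer | src/normalizer.py | compute_readiness_score
-- ===== SOURCE A (Python) =====
-- from typing import Dict, List, Optional, Tuple
--
-- CRITICAL_FLAGS = {
--     "missing_applicant_id",
--     "missing_name",
--     "missing_email",
--     "invalid_email",
--     "missing_program",
--     "invalid_submission_date",
-- }
--
-- HIGH_FLAGS = {
--     "gpa_out_of_range",
--     "invalid_gpa",
--     "future_submission_date",
--     "missing_submission_date",
--     "graduation_year_out_of_range",
--     "invalid_graduation_year",
--     "missing_citizenship_status",
--     "unrecognized_citizenship_status",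
-- }
--
-- def compute_readiness_score(flags: List[str]) -> int:
--     score = 100
--     for flag in flags:
--         if flag in CRITICAL_FLAGS:
--             score -= 30
--         elif flag in HIGH_FLAGS:
--             score -= 15
--         else:
--             score -= 8
--     return max(0, score)
-- ===== SOURCE B (Python) =====
-- CRITICAL_FLAGS = {
--     "missing_applicant_id",
--     "missing_name",
--     "missing_email",
--     "invalid_email",
--     "missing_program",
--     "invalid_submission_date",
-- }
--
-- HIGH_FLAGS = {
--     "gpa_out_of_range",
--     "invalid_gpa",
--     "future_submission_date",
--     "missing_submission_date",
--     "graduation_year_out_of_range",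
--     "invalid_graduation_year",
--     "missing_citizenship_status",
--     "unrecognized_citizenship_status",
-- }
--
-- def compute_readiness_score(flags):
--     critical = sum(1 for f in flags if f in CRITICAL_FLAGS)
--     high = sum(1 for f in flags if f in HIGH_FLAGS)
--     other = len(flags) - critical - high
--     return max(0, 100 - 30 * critical - 15 * high - 8 * other)
-- ===== Notes on version B (the rewrite author's own statement) =====
-- stated objective: simpler
-- what changed: Replaces the running-subtraction loop with category counts (critical/high, other derived from len) plugged into one closed arithmetic formula max(0, 100 - 30c - 15h - 8o).
import Mathlib
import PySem

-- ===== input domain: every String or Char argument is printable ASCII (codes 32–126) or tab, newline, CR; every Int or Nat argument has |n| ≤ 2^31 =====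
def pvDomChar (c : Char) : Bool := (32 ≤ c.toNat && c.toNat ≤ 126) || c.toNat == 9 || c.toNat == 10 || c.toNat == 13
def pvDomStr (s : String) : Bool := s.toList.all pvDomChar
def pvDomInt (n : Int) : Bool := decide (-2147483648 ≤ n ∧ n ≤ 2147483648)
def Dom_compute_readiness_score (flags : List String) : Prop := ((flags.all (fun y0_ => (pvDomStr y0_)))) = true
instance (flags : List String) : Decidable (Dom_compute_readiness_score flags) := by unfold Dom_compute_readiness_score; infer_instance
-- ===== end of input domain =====

-- ===== PORT A =====
-- Port of A: running score, per-flag subtraction, clamp at the end.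
def pvCriticalFlags : List String :=
  ["missing_applicant_id", "missing_name", "missing_email", "invalid_email",
   "missing_program", "invalid_submission_date"]

def pvHighFlags : List String :=
  ["gpa_out_of_range", "invalid_gpa", "future_submission_date", "missing_submission_date",
   "graduation_year_out_of_range", "invalid_graduation_year", "missing_citizenship_status",
   "unrecognized_citizenship_status"]

def compute_readiness_score (flags : List String) : Int :=
  max 0 (flags.foldl (fun score flag =>
    if pvCriticalFlags.contains flag then score - 30
    else if pvHighFlags.contains flag then score - 15
    else score - 8) 100)

-- ===== PORT B =====
-- Port of B: count by category, closed arithmetic formula.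
def compute_readiness_score_alt (flags : List String) : Int :=
  let critical : Int := flags.countP (fun f => pvCriticalFlags.contains f)
  let high : Int := flags.countP (fun f => pvHighFlags.contains f)
  let other : Int := (flags.length : Int) - critical - high
  max 0 (100 - 30 * critical - 15 * high - 8 * other)

-- ===== PRECONDITION & SPEC =====
def Spec_compute_readiness_score (flags : List String) (out : Int) : Prop := out = compute_readiness_score_alt flags
instance (flags : List String) (out : Int) : Decidable (Spec_compute_readiness_score flags out) := by unfold Spec_compute_readiness_score; infer_instance

-- ===== CLAIM (what is proved, stated in full; the proofs are below) =====
def Claim_equal_compute_readiness_score : Prop := ∀ (flags : List String), Dom_compute_readiness_score flags → Spec_compute_readiness_score flags (compute_readiness_score flags)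

-- ===== LEMMAS AND PROOFS =====
theorem pvCritical_not_high (f : String) (h : pvCriticalFlags.contains f = true) :
    pvHighFlags.contains f = false := by
  simp [pvCriticalFlags] at h
  rcases h with rfl | rfl | rfl | rfl | rfl | rfl <;> decide

theorem pvFoldl_eq (flags : List String) (s : Int) :
    flags.foldl (fun score flag =>
      if pvCriticalFlags.contains flag then score - 30
      else if pvHighFlags.contains flag then score - 15
      else score - 8) s
    = s - 30 * (flags.countP (fun f => pvCriticalFlags.contains f) : Int)
        - 15 * (flags.countP (fun f => pvHighFlags.contains f) : Int)
        - 8 * ((flags.length : Int)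
               - (flags.countP (fun f => pvCriticalFlags.contains f) : Int)
               - (flags.countP (fun f => pvHighFlags.contains f) : Int)) := by
  induction flags generalizing s with
  | nil => simp
  | cons a t ih =>
    rw [List.foldl_cons]
    by_cases hc : pvCriticalFlags.contains a = true
    · have hh := pvCritical_not_high a hc
      rw [if_pos hc, ih]
      simp only [List.countP_cons, hc, hh, List.length_cons]
      push_cast
      ring
    · by_cases hh : pvHighFlags.contains a = true
      · rw [if_neg hc, if_pos hh, ih]
        simp only [List.countP_cons, hc, hh, List.length_cons]
        push_cast
        ring
      · rw [if_neg hc, if_neg hh, ih]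
        simp only [List.countP_cons, hc, hh, List.length_cons]
        push_cast
        ring

-- ===== VERDICT (by name: the statement is the Claim_ definition above) =====
theorem compute_readiness_score_spec : Claim_equal_compute_readiness_score := by
  intro flags _
  unfold Spec_compute_readiness_score compute_readiness_score compute_readiness_score_alt
  rw [pvFoldl_eq]
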